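-- pv_equiv track=rewrite | github.com/cgc/muzero-general | games/gametools/obstacle_mazes.py | parse_tile_array
-- ===== SOURCE A (Python) =====
-- def parse_tile_array(tile_array, padding=1, ignore='.'):
--     objs = {}
--     h, w = len(tile_array), len(tile_array[0])
--     v_pad = ['='*w for _ in range(padding)]
--     h_pad = '='*padding
--     for y, row in enumerate(v_pad+tile_array+v_pad):
--         padded_row = h_pad+row+h_pad
--         for x, c in enumerate(padded_row):
--             if c in ignore:
--                 continue
--             loc = (x, y)
--             obj = objs.get(c, set([])) | {loc}
--             objs[c] = obj
--     return objs
-- ===== SOURCE B (Python) =====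
-- def parse_tile_array(tile_array, padding=1, ignore='.'):
--     # Same result as the padded-string version, but without building any padded
--     # strings: one direct pass over the tile interior plus analytic range loops
--     # that generate the '=' frame coordinates.
--     objs = {}
--     pad = max(padding, 0)
--     h, w = len(tile_array), len(tile_array[0])
--     width = w + 2 * pad
--
--     def add(c, x, y):
--         if c not in ignore:
--             objs.setdefault(c, set()).add((x, y))
--
--     def frame_row(y):
--         for x in range(width):
--             add('=', x, y)
--
--     for y in range(pad):                        # top frame rows
--         frame_row(y)
--     for y, row in enumerate(tile_array, pad):   # interior rows
--         for x in range(pad):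
--             add('=', x, y)
--         for x, c in enumerate(row, pad):
--             add(c, x, y)
--         for x in range(pad + len(row), pad + len(row) + pad):
--             add('=', x, y)
--     for y in range(pad + h, pad + h + pad):     # bottom frame rows
--         frame_row(y)
--     return objs
-- ===== Notes on version B (the rewrite author's own statement) =====
-- stated objective: faster
-- what changed: Instead of materializing padded rows ('='*w strings, h_pad+row+h_pad concatenations) and scanning them with one uniform double loop that rebuilds each character's set via 'objs.get(c, set()) | {loc}' (a full set copy per cell), B scans the tile interior directly and generates the '=' frame coordinates analytically with range loops, accumulating via dict.setdefault into sets mutated in place with .add.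
import Mathlib
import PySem

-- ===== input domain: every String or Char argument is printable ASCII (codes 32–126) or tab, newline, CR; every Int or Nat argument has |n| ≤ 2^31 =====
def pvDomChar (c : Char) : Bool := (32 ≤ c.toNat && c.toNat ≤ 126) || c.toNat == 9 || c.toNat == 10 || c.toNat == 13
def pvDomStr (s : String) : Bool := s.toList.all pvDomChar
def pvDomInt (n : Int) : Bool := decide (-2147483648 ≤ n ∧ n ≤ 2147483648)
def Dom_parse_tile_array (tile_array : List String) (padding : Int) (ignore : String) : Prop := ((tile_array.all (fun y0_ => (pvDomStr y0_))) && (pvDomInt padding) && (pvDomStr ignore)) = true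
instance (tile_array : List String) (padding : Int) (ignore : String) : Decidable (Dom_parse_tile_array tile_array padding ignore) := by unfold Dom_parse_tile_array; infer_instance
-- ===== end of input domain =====

-- B replaces A's padded-string construction and uniform double scan by a direct pass over the
-- tile interior plus analytic range loops that generate the '=' frame (alternative decomposition).


-- ===== PORT A =====
-- A's inner loop: 'for x, c in enumerate(padded_row): if c in ignore: continue;
--                  loc = (x, y); obj = objs.get(c, set([])) | {loc}; objs[c] = obj'
def pvRowA (ignore : String) (y : Int) (objs : PySem.Dict String (PySem.Set (Int × Int)))
    (padded_row : List Char) : PySem.Dict String (PySem.Set (Int × Int)) :=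
  (PySem.List.enumerate padded_row).foldl
    (fun objs xc =>
      if PySem.Str.isIn (String.ofList [xc.2]) ignore then objs
      else
        let loc : Int × Int := (xc.1, y)
        let obj := PySem.Set.union (objs.getD (String.ofList [xc.2]) PySem.Set.empty) (PySem.Set.ofList [loc])
        objs.insert (String.ofList [xc.2]) obj)
    objs

def parse_tile_array (tile_array : List String) (padding : Int) (ignore : String) : List (String × List (Int × Int)) :=
  -- 'len(tile_array[0])' raises IndexError on []; Pre_ excludes that input, so the 0 branch is unreachable
  let w : Nat := match tile_array with | [] => 0 | r :: _ => r.toList.length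
  let v_pad : List (List Char) := List.replicate padding.toNat (List.replicate w '=')  -- ['='*w]*padding ('' * negative = '')
  let h_pad : List Char := List.replicate padding.toNat '='
  let objs : PySem.Dict String (PySem.Set (Int × Int)) :=
    (PySem.List.enumerate (v_pad ++ tile_array.map String.toList ++ v_pad)).foldl
      (fun objs yrow => pvRowA ignore yrow.1 objs (h_pad ++ yrow.2 ++ h_pad))
      PySem.Dict.empty
  objs.items

-- ===== PORT B =====
-- Source B's 'add(c, x, y)': if c not in ignore: objs.setdefault(c, set()).add((x, y))
-- (setdefault-then-mutate-in-place keeps the key's position and updates its value: Dict.modify)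
def pvAdd (ignore : String) (objs : PySem.Dict String (PySem.Set (Int × Int))) (c : Char) (x y : Int) :
    PySem.Dict String (PySem.Set (Int × Int)) :=
  if !PySem.Str.isIn (String.ofList [c]) ignore then
    objs.modify (String.ofList [c]) PySem.Set.empty (fun s => PySem.Set.add s (x, y))
  else objs

-- Source B's 'frame_row(y)': for x in range(width): add('=', x, y)
def pvFrameRowB (ignore : String) (width y : Int) (objs : PySem.Dict String (PySem.Set (Int × Int))) :
    PySem.Dict String (PySem.Set (Int × Int)) :=
  (PySem.List.pyRange 0 width).foldl (fun d x => pvAdd ignore d '=' x y) objs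

def parse_tile_array_alt (tile_array : List String) (padding : Int) (ignore : String) : List (String × List (Int × Int)) :=
  -- 'len(tile_array[0])' raises IndexError on []; Pre_ excludes that input, so the 0 branch is unreachable
  let pad : Int := max padding 0
  let h : Int := tile_array.length
  let w : Int := ((match tile_array with | [] => 0 | r :: _ => r.toList.length : Nat) : Int)
  let width : Int := w + 2 * pad
  let objs0 := (PySem.List.pyRange 0 pad).foldl          -- top frame rows
    (fun d y => pvFrameRowB ignore width y d) PySem.Dict.empty
  let objs1 := (PySem.List.enumerate (tile_array.map String.toList) pad).foldl   -- interior rows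
    (fun d yrow =>
      let y := yrow.1
      let row := yrow.2
      let d := (PySem.List.pyRange 0 pad).foldl (fun d x => pvAdd ignore d '=' x y) d
      let d := (PySem.List.enumerate row pad).foldl (fun d xc => pvAdd ignore d xc.2 xc.1 y) d
      (PySem.List.pyRange (pad + row.length) (pad + row.length + pad)).foldl
        (fun d x => pvAdd ignore d '=' x y) d)
    objs0
  let objs2 := (PySem.List.pyRange (pad + h) (pad + h + pad)).foldl              -- bottom frame rows
    (fun d y => pvFrameRowB ignore width y d) objs1
  objs2.items

-- ===== PRECONDITION & SPEC =====
-- Pre_ excludes exactly the empty tile_array, on which A (and B alike) raises IndexError at 'tile_array[0]'.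
def Pre_parse_tile_array (tile_array : List String) (padding : Int) (ignore : String) : Prop :=
  tile_array ≠ []
instance (tile_array : List String) (padding : Int) (ignore : String) : Decidable (Pre_parse_tile_array tile_array padding ignore) := by unfold Pre_parse_tile_array; infer_instance
def pvWitness_parse_tile_array : List String × Int × String := (["ab", ".="], 1, ".")

def Spec_parse_tile_array (tile_array : List String) (padding : Int) (ignore : String) (out : List (String × List (Int × Int))) : Prop := out = parse_tile_array_alt tile_array padding ignore
instance (tile_array : List String) (padding : Int) (ignore : String) (out : List (String × List (Int × Int))) : Decidable (Spec_parse_tile_array tile_array padding ignore out) := by unfold Spec_parse_tile_array; infer_instance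

-- ===== CLAIM (what is proved, stated in full; the proofs are below) =====
def Claim_equal_parse_tile_array : Prop := ∀ (tile_array : List String) (padding : Int) (ignore : String), Dom_parse_tile_array tile_array padding ignore → Pre_parse_tile_array tile_array padding ignore → Spec_parse_tile_array tile_array padding ignore (parse_tile_array tile_array padding ignore)

-- ===== LEMMAS AND PROOFS =====

-- A's per-cell update equals B's 'add' (union with a singleton set = Set.add; dict re-insert = setdefault-and-mutate).
theorem pv_step_eq (ignore : String) (d : PySem.Dict String (PySem.Set (Int × Int))) (x y : Int) (c : Char) :
    (if PySem.Str.isIn (String.ofList [c]) ignore then d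
     else d.insert (String.ofList [c])
       (PySem.Set.union (d.getD (String.ofList [c]) PySem.Set.empty) (PySem.Set.ofList [(x, y)]))) =
    pvAdd ignore d c x y := by
  unfold pvAdd PySem.Dict.modify
  cases h : PySem.Str.isIn (String.ofList [c]) ignore <;>
    simp [PySem.Set.union, PySem.Set.update, PySem.Set.ofList, PySem.Set.add, PySem.Set.empty, List.foldl]

-- a fold over 'enumerate(replicate p r, s)' is a fold over 'range(s, s + p)' with the constant element r
theorem pv_foldl_enum_replicate {α β : Type} (F : β → Int × α → β) (r : α) :
    ∀ (p : Nat) (s : Int) (d : β),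
      (PySem.List.enumerate (List.replicate p r) s).foldl F d =
      (PySem.List.pyRange s (s + p)).foldl (fun d y => F d (y, r)) d := by
  intro p
  induction p with
  | zero => intro s d; simp [PySem.List.enumerate_nil, PySem.List.pyRange]
  | succ p ih =>
    intro s d
    rw [PySem.List.pyRange_one_cons (show s < s + ((p + 1 : Nat) : Int) by push_cast; omega),
      List.foldl_cons]
    rw [List.replicate_succ, PySem.List.enumerate_cons, List.foldl_cons, ih]
    have hb : s + 1 + (p : Int) = s + ((p + 1 : Nat) : Int) := by push_cast; ring
    rw [hb]

-- A's row scan, with every per-cell step rewritten to B's 'add'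
theorem pvRowA_eq (ignore : String) (y : Int) (d : PySem.Dict String (PySem.Set (Int × Int)))
    (l : List Char) :
    pvRowA ignore y d l =
    (PySem.List.enumerate l).foldl (fun d xc => pvAdd ignore d xc.2 xc.1 y) d := by
  unfold pvRowA
  congr 1
  funext d xc
  obtain ⟨x, c⟩ := xc
  exact pv_step_eq ignore d x y c

-- A's scan of one padded interior row equals B's three-segment pass over that row
theorem pv_row_eq (ignore : String) (y : Int) (p : Nat) (row : List Char)
    (d : PySem.Dict String (PySem.Set (Int × Int))) :
    pvRowA ignore y d (List.replicate p '=' ++ row ++ List.replicate p '=') =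
    (PySem.List.pyRange ((p : Int) + row.length) ((p : Int) + row.length + p)).foldl
      (fun d x => pvAdd ignore d '=' x y)
      ((PySem.List.enumerate row (p : Int)).foldl (fun d xc => pvAdd ignore d xc.2 xc.1 y)
        ((PySem.List.pyRange 0 (p : Int)).foldl (fun d x => pvAdd ignore d '=' x y) d)) := by
  rw [pvRowA_eq, PySem.List.enumerate_append, PySem.List.enumerate_append,
    List.foldl_append, List.foldl_append]
  rw [pv_foldl_enum_replicate, pv_foldl_enum_replicate]
  simp only [zero_add, List.length_replicate, List.length_append]
  congr 1

-- A's scan of one all-'=' padding row equals B's frame_row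
theorem pv_frame_eq (ignore : String) (y : Int) (p w : Nat)
    (d : PySem.Dict String (PySem.Set (Int × Int))) :
    pvRowA ignore y d (List.replicate p '=' ++ List.replicate w '=' ++ List.replicate p '=') =
    pvFrameRowB ignore ((w : Int) + 2 * (p : Int)) y d := by
  rw [← List.replicate_add, ← List.replicate_add, pvRowA_eq, pv_foldl_enum_replicate]
  unfold pvFrameRowB
  have hb : (0 : Int) + ((p + w + p : Nat) : Int) = (w : Int) + 2 * (p : Int) := by push_cast; ring
  rw [hb]

theorem pv_main (tile_array : List String) (padding : Int) (ignore : String)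
    (hpre : tile_array ≠ []) :
    parse_tile_array tile_array padding ignore = parse_tile_array_alt tile_array padding ignore := by
  obtain ⟨r, rest, rfl⟩ := List.exists_cons_of_ne_nil hpre
  have hpad : max padding 0 = ((padding.toNat : Nat) : Int) := by omega
  simp only [parse_tile_array, parse_tile_array_alt, hpad,
    PySem.List.enumerate_append, List.foldl_append, pv_foldl_enum_replicate]
  simp only [pv_frame_eq]
  simp only [pv_row_eq]
  simp only [List.length_replicate, List.length_append, List.length_map, List.length_cons,
    zero_add, Nat.cast_add, Nat.cast_one]

-- ===== VERDICT (by name: the statement is the Claim_ definition above) =====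
theorem parse_tile_array_spec : Claim_equal_parse_tile_array := by
  intro tile_array padding ignore _hdom hpre
  exact pv_main tile_array padding ignore hpre
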